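-- pv_equiv track=rewrite | github.com/ttjoseph/mmdevel | resid_map.py | annotate_numbers
-- ===== SOURCE A (Python) =====
-- def annotate_numbers(seq):
-- 	ids = []
-- 	counter = 0
-- 	for char in seq:
-- 		if char == '-':
-- 			ids.append(None)
-- 		else:
-- 			ids.append(counter)
-- 			counter += 1
-- 	return ids
-- ===== SOURCE B (Python) =====
-- def annotate_numbers(seq):
--     # Two-pass: exclusive prefix counts of non-gap chars, then map.
--     prefix = [0] * (len(seq) + 1)
--     for i, c in enumerate(seq):
--         prefix[i + 1] = prefix[i] + (c != '-')
--     return [None if c == '-' else prefix[i] for i, c in enumerate(seq)]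
-- ===== Notes on version B (the rewrite author's own statement) =====
-- stated objective: alternative
-- what changed: Replaces the single pass with a live mutable counter by a two-pass scheme: first build an exclusive prefix-count table of non-gap characters, then map each position to None or its table entry.
import Mathlib
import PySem

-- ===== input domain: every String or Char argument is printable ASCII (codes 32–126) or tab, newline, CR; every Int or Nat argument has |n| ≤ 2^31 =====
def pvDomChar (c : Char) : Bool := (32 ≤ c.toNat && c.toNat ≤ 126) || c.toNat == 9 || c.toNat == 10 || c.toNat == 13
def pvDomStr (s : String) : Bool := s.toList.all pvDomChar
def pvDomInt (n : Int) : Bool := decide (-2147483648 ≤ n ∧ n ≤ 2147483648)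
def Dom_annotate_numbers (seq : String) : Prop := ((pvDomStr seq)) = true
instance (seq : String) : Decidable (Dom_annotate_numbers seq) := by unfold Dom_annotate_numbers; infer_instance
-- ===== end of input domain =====

-- ===== PORT A =====
def annotate_numbers (seq : String) : List (Option Int) :=
  (seq.toList.foldl
    (fun (st : List (Option Int) × Int) c =>
      if c = '-' then (st.1 ++ [none], st.2)
      else (st.1 ++ [some st.2], st.2 + 1))
    ([], 0)).1

-- ===== PORT B =====
-- B: two passes — an exclusive prefix-count table of non-gap chars, then a map (alternative decomposition).
-- altPrefix cs acc = the exclusive prefix counts for each position of cs, starting from acc.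
def altPrefix : List Char → Int → List Int
  | [], _ => []
  | c :: rest, acc => acc :: altPrefix rest (acc + (if c = '-' then 0 else 1))

def annotate_numbers_alt (seq : String) : List (Option Int) :=
  let cs := seq.toList
  (cs.zip (altPrefix cs 0)).map (fun p => if p.1 = '-' then none else some p.2)

-- ===== PRECONDITION & SPEC =====
def Spec_annotate_numbers (seq : String) (out : List (Option Int)) : Prop := out = annotate_numbers_alt seq
instance (seq : String) (out : List (Option Int)) : Decidable (Spec_annotate_numbers seq out) := by unfold Spec_annotate_numbers; infer_instance

-- ===== CLAIM (what is proved, stated in full; the proofs are below) =====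
def Claim_equal_annotate_numbers : Prop := ∀ (seq : String), Dom_annotate_numbers seq → Spec_annotate_numbers seq (annotate_numbers seq)

-- ===== LEMMAS AND PROOFS =====

-- ===== VERDICT (by name: the statement is the Claim_ definition above) =====
lemma annotate_fold_eq (cs : List Char) (ids : List (Option Int)) (ctr : Int) :
    (cs.foldl
      (fun (st : List (Option Int) × Int) c =>
        if c = '-' then (st.1 ++ [none], st.2)
        else (st.1 ++ [some st.2], st.2 + 1))
      (ids, ctr)).1
    = ids ++ (cs.zip (altPrefix cs ctr)).map (fun p => if p.1 = '-' then none else some p.2) := by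
  induction cs generalizing ids ctr with
  | nil => simp
  | cons c rest ih =>
    by_cases h : c = '-' <;>
      simp [altPrefix, h, List.foldl_cons, ih, List.append_assoc]

theorem annotate_numbers_spec : Claim_equal_annotate_numbers := by
  intro seq _
  unfold Spec_annotate_numbers annotate_numbers annotate_numbers_alt
  simpa using annotate_fold_eq seq.toList [] 0
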